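-- pv_equiv track=rewrite | github.com/mhso/SuperHexagonAI | src/superhexagonai/features.py | get_sector_connections
-- ===== SOURCE A (Python) =====
-- from typing import List, Optional, Tuple
--
-- def get_sector_connections(contour_connections: List[List[int]]) -> List[List[List[int]]]:
--     """
--     Return a list of sector connections, where each entry describes the connections
--     in each layer for that sector. For each layer, a list of two elements describe
--     whether there is a connection to the left or right, respectively.
--     """
--     connections = []
--     for i, conn_data_1 in enumerate(contour_connections):
--         left = i - 1 if i > 0 else 5
--         right = i + 1 if i < len(contour_connections) - 1 else 0
--
--         sector_connections = []
--         for ci, (_, conns_in_sector) in enumerate(conn_data_1):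
--             conns_found = [0] * 2
--             for index, conn_data in enumerate([contour_connections[left], contour_connections[right]]):
--                 for cj, _ in conn_data:
--                     if cj in conns_in_sector:
--                         conns_found[index] = 1
--                         break
--
--             sector_connections.append(conns_found)
--
--         if len(sector_connections) < 6:
--             diff = 6 - len(sector_connections)
--             sector_connections = sector_connections + ([[0, 0]] * diff)
--
--         connections.append(sector_connections)
--
--     return connections
-- ===== SOURCE B (Python) =====
-- def _invert(layer):
--     """Inverted index of a layer: connection value -> list of sector indices holding it."""
--     pos = {}
--     for si, (_, conns) in enumerate(layer):
--         for v in conns: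
--             pos.setdefault(v, []).append(si)
--     return pos
--
--
-- def _hits(neighbor, pos):
--     """Sector indices reachable from the neighbor layer: scatter its keys through the index."""
--     h = set()
--     for cj, _ in neighbor:
--         h.update(pos.get(cj, ()))
--     return h
--
--
-- def get_sector_connections(contour_connections):
--     """
--     Same result as A, by the opposite ("scatter") strategy: per layer build an
--     inverted index value->sector indices once, then iterate each neighbor's keys
--     and mark the sectors they hit; rows are read off the two hit-sets.
--     """
--     n = len(contour_connections)
--     out = []
--     for i, layer in enumerate(contour_connections):
--         rows = []
--         if layer:
--             pos = _invert(layer)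
--             left = i - 1 if i > 0 else 5
--             right = i + 1 if i < n - 1 else 0
--             hit_l = _hits(contour_connections[left], pos)
--             hit_r = _hits(contour_connections[right], pos)
--             rows = [[int(si in hit_l), int(si in hit_r)] for si in range(len(layer))]
--         if len(rows) < 6:
--             rows += [[0, 0]] * (6 - len(rows))
--         out.append(rows)
--     return out
-- ===== Notes on version B (the rewrite author's own statement) =====
-- stated objective: alternative
-- what changed: B inverts the direction of the search: per layer it builds an inverted index (connection value -> sector indices) once, then scatters each neighbor layer's keys through that index into two hit-sets of sector indices, and reads each row off the hit-sets, instead of A's gather strategy of rescanning both neighbor layers per sector with an inner break loop.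
import Mathlib
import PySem

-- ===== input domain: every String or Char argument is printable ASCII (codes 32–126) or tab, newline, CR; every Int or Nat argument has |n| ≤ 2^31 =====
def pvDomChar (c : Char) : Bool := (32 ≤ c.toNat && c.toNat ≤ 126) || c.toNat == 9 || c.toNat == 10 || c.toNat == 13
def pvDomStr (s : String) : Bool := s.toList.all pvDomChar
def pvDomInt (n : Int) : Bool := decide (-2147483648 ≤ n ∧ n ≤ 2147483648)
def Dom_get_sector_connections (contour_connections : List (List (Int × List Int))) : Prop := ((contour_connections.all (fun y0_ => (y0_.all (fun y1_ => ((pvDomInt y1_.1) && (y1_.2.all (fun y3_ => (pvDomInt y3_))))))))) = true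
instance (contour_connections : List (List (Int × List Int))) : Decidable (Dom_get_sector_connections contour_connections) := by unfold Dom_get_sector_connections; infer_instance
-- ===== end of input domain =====

-- B inverts the direction of the search: per layer it builds an inverted index
-- (connection value -> sector indices) once, scatters each neighbor layer's keys
-- through it into two hit-sets of sector indices, and reads the rows off the
-- hit-sets — instead of A's per-sector rescan of both neighbor layers (gather with
-- an inner break loop). Objective: alternative structure, same exact result.


-- ===== PORT A =====
-- 'for cj, _ in conn_data: if cj in conns_in_sector: flag = 1; break'
def pvAScan : List (Int × List Int) → List Int → Int
  | [], _ => 0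
  | p :: rest, conns => if conns.contains p.1 then 1 else pvAScan rest conns

def get_sector_connections (contour_connections : List (List (Int × List Int))) : List (List (List Int)) :=
  (PySem.List.enumerate contour_connections).map (fun p =>
    let i := p.1
    let left : Int := if i > 0 then i - 1 else 5
    let right : Int := if i < (contour_connections.length : Int) - 1 then i + 1 else 0
    let sector_connections : List (List Int) := p.2.map (fun q =>
      [pvAScan (PySem.List.pyGetD contour_connections left []) q.2,
       pvAScan (PySem.List.pyGetD contour_connections right []) q.2])
    if sector_connections.length < 6 then
      sector_connections ++ List.replicate (6 - sector_connections.length) [0, 0]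
    else sector_connections)

-- ===== PORT B =====
-- _invert: 'pos.setdefault(v, []).append(si)' = pos[v] = pos.get(v, []) + [si]
def pvInvert (layer : List (Int × List Int)) : PySem.Dict Int (List Int) :=
  (PySem.List.enumerate layer).foldl
    (fun d q => q.2.2.foldl (fun d v => d.modify v [] (· ++ [q.1])) d)
    PySem.Dict.empty

-- _hits: 'h.update(pos.get(cj, ()))' over the neighbor layer's keys
def pvHits (neighbor : List (Int × List Int)) (pos : PySem.Dict Int (List Int)) : PySem.Set Int :=
  neighbor.foldl (fun h r => PySem.Set.update h (pos.getD r.1 [])) PySem.Set.empty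

def get_sector_connections_alt (contour_connections : List (List (Int × List Int))) : List (List (List Int)) :=
  let n : Int := contour_connections.length
  (PySem.List.enumerate contour_connections).map (fun p =>
    let i := p.1
    let layer := p.2
    let rows : List (List Int) :=
      if layer ≠ [] then
        let pos := pvInvert layer
        let left : Int := if i > 0 then i - 1 else 5
        let right : Int := if i < n - 1 then i + 1 else 0
        let hitL := pvHits (PySem.List.pyGetD contour_connections left []) pos
        let hitR := pvHits (PySem.List.pyGetD contour_connections right []) pos
        (List.range layer.length).map (fun si : Nat =>
          [if hitL.contains (si : Int) then 1 else 0,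
           if hitR.contains (si : Int) then 1 else 0])
      else []
    if rows.length < 6 then rows ++ List.replicate (6 - rows.length) [0, 0] else rows)

-- ===== PRECONDITION & SPEC =====
-- Pre_ excludes exactly the inputs on which Python A raises IndexError (fewer than 6
-- layers with a nonempty first layer, where layer 0 indexes contour_connections[5]);
-- Python B raises there too.
def Pre_get_sector_connections (contour_connections : List (List (Int × List Int))) : Prop :=
  6 ≤ contour_connections.length ∨ contour_connections.headI = []
instance (contour_connections : List (List (Int × List Int))) : Decidable (Pre_get_sector_connections contour_connections) := by unfold Pre_get_sector_connections; infer_instance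

def pvWitness_get_sector_connections : (List (List (Int × List Int))) :=
  [[(0, [1])], [(1, [0, 2])], [(2, [1])], [], [(4, [])], [(5, [0])]]

def Spec_get_sector_connections (contour_connections : List (List (Int × List Int))) (out : List (List (List Int))) : Prop := out = get_sector_connections_alt contour_connections
instance (contour_connections : List (List (Int × List Int))) (out : List (List (List Int))) : Decidable (Spec_get_sector_connections contour_connections out) := by unfold Spec_get_sector_connections; infer_instance

-- ===== CLAIM (what is proved, stated in full; the proofs are below) =====
def Claim_equal_get_sector_connections : Prop := ∀ (contour_connections : List (List (Int × List Int))), Dom_get_sector_connections contour_connections → Pre_get_sector_connections contour_connections → Spec_get_sector_connections contour_connections (get_sector_connections contour_connections)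

-- ===== LEMMAS AND PROOFS =====

theorem pvAScan_eq_zero (data : List (Int × List Int)) (conns : List Int)
    (h : ∀ p ∈ data, p.1 ∉ conns) : pvAScan data conns = 0 := by
  induction data with
  | nil => rfl
  | cons p rest ih =>
    simp only [pvAScan]
    rw [if_neg, ih (fun q hq => h q (List.mem_cons_of_mem _ hq))]
    simpa using h p (List.mem_cons_self)

theorem pvAScan_eq_one (data : List (Int × List Int)) (conns : List Int)
    (h : ∃ p ∈ data, p.1 ∈ conns) : pvAScan data conns = 1 := by
  induction data with
  | nil => simp at h
  | cons p rest ih =>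
    simp only [pvAScan]
    by_cases hc : p.1 ∈ conns
    · simp [hc]
    · rw [if_neg (by simpa using hc)]
      apply ih
      rcases h with ⟨q, hq, hqc⟩
      rcases List.mem_cons.mp hq with rfl | hq'
      · exact absurd hqc hc
      · exact ⟨q, hq', hqc⟩

-- the inverted index maps v to exactly the (enumerate) indices of sectors containing v
theorem mem_getD_pvInvert (layer : List (Int × List Int)) (v x : Int) :
    x ∈ (pvInvert layer).getD v [] ↔
      ∃ q ∈ PySem.List.enumerate layer, q.1 = x ∧ v ∈ q.2.2 := by
  have hfold :
      pvInvert layer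
        = ((PySem.List.enumerate layer).flatMap
            (fun q => q.2.2.map (fun w => (w, q.1)))).foldl
            (fun d p => d.modify p.1 [] (· ++ [p.2])) PySem.Dict.empty := by
    rw [List.foldl_flatMap]
    unfold pvInvert
    apply PySem.List.foldl_congr_mem
    intro d q _
    rw [List.foldl_map]
  rw [hfold, PySem.Dict.getD_foldl_modify_append]
  simp only [PySem.Dict.getD_empty, List.nil_append, List.mem_map, List.mem_filter,
    List.mem_flatMap, beq_iff_eq]
  constructor
  · rintro ⟨p, ⟨⟨q, hq, w, hwmem, rfl⟩, hv⟩, hx⟩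
    exact ⟨q, hq, hx, by simpa [← hv] using hwmem⟩
  · rintro ⟨q, hq, hx, hv⟩
    exact ⟨(v, q.1), ⟨⟨q, hq, v, hv, rfl⟩, rfl⟩, hx⟩

theorem mem_foldl_update (l : List (Int × List Int)) (pos : PySem.Dict Int (List Int))
    (s : PySem.Set Int) (x : Int) :
    x ∈ l.foldl (fun h r => PySem.Set.update h (pos.getD r.1 [])) s ↔
      x ∈ s ∨ ∃ r ∈ l, x ∈ pos.getD r.1 [] := by
  induction l generalizing s with
  | nil => simp
  | cons r rest ih =>
    simp only [List.foldl_cons, ih, PySem.Set.mem_update, List.mem_cons]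
    constructor
    · rintro (( hs | hr ) | ⟨r', hr', hx⟩)
      · exact Or.inl hs
      · exact Or.inr ⟨r, Or.inl rfl, hr⟩
      · exact Or.inr ⟨r', Or.inr hr', hx⟩
    · rintro (hs | ⟨r', (rfl | hr'), hx⟩)
      · exact Or.inl (Or.inl hs)
      · exact Or.inl (Or.inr hx)
      · exact Or.inr ⟨r', hr', hx⟩

theorem mem_pvHits (neighbor : List (Int × List Int)) (pos : PySem.Dict Int (List Int)) (x : Int) :
    x ∈ pvHits neighbor pos ↔ ∃ r ∈ neighbor, x ∈ pos.getD r.1 [] := by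
  unfold pvHits
  rw [mem_foldl_update]
  simp [PySem.Set.empty]

-- the B-side flag at sector index si equals A's scan of the same neighbor layer
theorem flag_eq_scan (neighbor layer : List (Int × List Int)) (si : Nat)
    (hsi : si < layer.length) :
    (if (pvHits neighbor (pvInvert layer)).contains (si : Int) then (1 : Int) else 0)
      = pvAScan neighbor layer[si].2 := by
  by_cases h : ∃ r ∈ neighbor, r.1 ∈ layer[si].2
  · rw [pvAScan_eq_one _ _ h, if_pos]
    rw [PySem.Set.contains_iff, mem_pvHits]
    rcases h with ⟨r, hr, hv⟩
    refine ⟨r, hr, (mem_getD_pvInvert layer r.1 si).mpr ?_⟩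
    exact ⟨((si : Int), layer[si]), by
      rw [PySem.List.mem_enumerate_iff]; exact ⟨si, hsi, by simp⟩, rfl, hv⟩
  · rw [pvAScan_eq_zero _ _ (by push Not at h; exact h), if_neg]
    intro hc
    apply h
    rw [PySem.Set.contains_iff, mem_pvHits] at hc
    rcases hc with ⟨r, hr, hx⟩
    rcases (mem_getD_pvInvert layer r.1 si).mp hx with ⟨q, hq, hq1, hqv⟩
    rw [PySem.List.mem_enumerate_iff] at hq
    rcases hq with ⟨k, hk, rfl⟩
    have : k = si := by
      have := hq1; simp only [zero_add] at this; exact_mod_cast this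
    subst this
    exact ⟨r, hr, hqv⟩

-- ===== VERDICT (by name: the statement is the Claim_ definition above) =====
theorem get_sector_connections_spec : Claim_equal_get_sector_connections := by
  intro cc _ _
  unfold Spec_get_sector_connections get_sector_connections get_sector_connections_alt
  apply List.map_congr_left
  intro p _
  simp only
  by_cases hl : p.2 = []
  · simp [hl]
  · rw [if_pos hl]
    have hrows :
        p.2.map (fun q =>
          [pvAScan (PySem.List.pyGetD cc (if p.1 > 0 then p.1 - 1 else 5) []) q.2,
           pvAScan (PySem.List.pyGetD cc (if p.1 < (cc.length : Int) - 1 then p.1 + 1 else 0) []) q.2])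
          = (List.range p.2.length).map (fun si : Nat =>
              [if (pvHits (PySem.List.pyGetD cc (if p.1 > 0 then p.1 - 1 else 5) []) (pvInvert p.2)).contains (si : Int) then (1 : Int) else 0,
               if (pvHits (PySem.List.pyGetD cc (if p.1 < (cc.length : Int) - 1 then p.1 + 1 else 0) []) (pvInvert p.2)).contains (si : Int) then (1 : Int) else 0]) := by
      apply List.ext_getElem
      · simp
      · intro si h1 h2
        simp only [List.getElem_map, List.getElem_range]
        have hsi : si < p.2.length := by simpa using h1
        rw [flag_eq_scan _ _ _ hsi, flag_eq_scan _ _ _ hsi]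
    rw [hrows]
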